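-- pv_equiv track=rewrite | github.com/acederberg/quarto-maths | dsa/leetcode/zigzag.py | coords
-- ===== SOURCE A (Python) =====
-- def coords(m: int, n_rows: int):
--     n = n_rows
--     N = n - 1
--     if N == 0:
--         yield from range(m)
--         return
--
--     incr = 2 * N
--     jj_max = (m // incr) + 1
--     yield from (num for jj in range(jj_max) if (num := incr * jj) < m)
--
--     for kk in range(1, n - 1):
--
--         for jj in range(jj_max):
--
--             aa = (incr * jj) + kk
--             bb = (incr * (jj + 1)) - kk
--
--             if aa < m:
--                 yield aa
--             if bb < m:
--                 yield bb
--
--     yield from (num for jj in range(jj_max) if (num := (incr * jj) + N) < m)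
-- ===== SOURCE B (Python) =====
-- def coords(m: int, n_rows: int):
--     if n_rows <= 0:
--         return
--     if n_rows == 1:
--         yield from range(m)
--         return
--     rows = [[] for _ in range(n_rows)]
--     cur, step = 0, 1
--     for i in range(m):
--         rows[cur].append(i)
--         if cur == 0:
--             step = 1
--         elif cur == n_rows - 1:
--             step = -1
--         cur += step
--     for row in rows:
--         yield from row
-- ===== Notes on version B (the rewrite author's own statement) =====
-- stated objective: idiomatic
-- what changed: Replaced A's per-row closed-form offset arithmetic (row 0, interleaved middle rows aa/bb, last row, each scanned over jj periods) by the standard zigzag simulation: one forward pass over the indices with a bouncing row cursor filling per-row buckets, then concatenating the buckets.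
-- intended difference: For n_rows <= 0 with m <= 0 in the narrow band where A's offset arithmetic still passes its '< m' guards (e.g. m=0, n_rows=0), A yields spurious negative 'indices' like [-1], while B yields [] — the intended traversal of zero rows is empty. — e.g. on coords(0, 0): A returns [-1], B returns []
import Mathlib
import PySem

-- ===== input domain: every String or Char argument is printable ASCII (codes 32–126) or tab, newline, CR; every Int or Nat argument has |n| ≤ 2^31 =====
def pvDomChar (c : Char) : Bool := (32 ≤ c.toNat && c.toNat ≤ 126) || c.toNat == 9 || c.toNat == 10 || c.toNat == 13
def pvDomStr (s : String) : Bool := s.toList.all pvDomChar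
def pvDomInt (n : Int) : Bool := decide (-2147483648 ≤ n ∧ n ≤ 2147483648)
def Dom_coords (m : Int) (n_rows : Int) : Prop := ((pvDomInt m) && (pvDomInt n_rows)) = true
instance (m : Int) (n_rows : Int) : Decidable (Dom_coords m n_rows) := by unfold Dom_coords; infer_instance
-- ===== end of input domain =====

-- B replaces A's per-row closed-form offset arithmetic by the standard zigzag simulation
-- (one forward pass over the indices with a bouncing row cursor, then concatenating the
-- per-row buckets); same cost class, more idiomatic. Return-value equivalence only
-- (both Pythons are generators; outputs compared as lists).

-- ===== PORT A =====
def coords (m : Int) (n_rows : Int) : List Int :=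
  let n := n_rows
  let N := n - 1
  if N = 0 then PySem.List.pyRange 0 m 1
  else
    let incr := 2 * N
    let jj_max := PySem.Int.floordiv m incr + 1
    let part1 := (PySem.List.pyRange 0 jj_max 1).foldl
      (fun acc jj => if incr * jj < m then acc ++ [incr * jj] else acc) []
    let part2 := (PySem.List.pyRange 1 (n - 1) 1).foldl
      (fun acc kk => (PySem.List.pyRange 0 jj_max 1).foldl
        (fun acc jj =>
          let aa := incr * jj + kk
          let bb := incr * (jj + 1) - kk
          let acc := if aa < m then acc ++ [aa] else acc
          if bb < m then acc ++ [bb] else acc) acc) []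
    let part3 := (PySem.List.pyRange 0 jj_max 1).foldl
      (fun acc jj => if incr * jj + N < m then acc ++ [incr * jj + N] else acc) []
    part1 ++ part2 ++ part3

-- ===== PORT B =====
-- (the cursor cur always stays inside [0, n_rows) in the simulated loop, so
--  .set cur.toNat / .getD cur.toNat are exactly Python's rows[cur] there)
def coords_alt (m : Int) (n_rows : Int) : List Int :=
  if n_rows ≤ 0 then []
  else if n_rows = 1 then PySem.List.pyRange 0 m 1
  else
    let st := (PySem.List.pyRange 0 m 1).foldl
      (fun (st : List (List Int) × Int × Int) i =>
        let rows := st.1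
        let cur := st.2.1
        let step := st.2.2
        let rows' := rows.set cur.toNat (rows.getD cur.toNat [] ++ [i])
        let step' := if cur = 0 then 1 else if cur = n_rows - 1 then -1 else step
        (rows', cur + step', step'))
      (List.replicate n_rows.toNat [], 0, 1)
    st.1.flatten

-- ===== PRECONDITION & SPEC =====
-- For n_rows ≤ 0 (no rows) with m ≤ 0 in the narrow band where A's offset arithmetic still
-- passes its `< m` guards, A yields spurious negative "indices" (e.g. [-1] for m=0, n_rows=0)
-- while B yields nothing — the intended traversal of zero rows is empty.
def D_coords (m : Int) (n_rows : Int) : Prop :=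
  n_rows ≤ 0 ∧ m ≤ 0 ∧
    2 * (n_rows - 1) * PySem.Int.floordiv m (2 * (n_rows - 1)) + (n_rows - 1) < m
instance (m : Int) (n_rows : Int) : Decidable (D_coords m n_rows) := by
  unfold D_coords; infer_instance

def Spec_coords (m : Int) (n_rows : Int) (out : List Int) : Prop :=
  ¬ D_coords m n_rows → out = coords_alt m n_rows
instance (m : Int) (n_rows : Int) (out : List Int) : Decidable (Spec_coords m n_rows out) := by
  unfold Spec_coords; infer_instance

def pvDiffWitness_coords : Int × Int := (0, 0)
def pvDiffWitnessOut_coords : (List Int) × (List Int) := ([-1], [])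

-- ===== CLAIM (what is proved, stated in full; the proofs are below) =====
def Claim_unchanged_coords : Prop :=
  ∀ (m : Int) (n_rows : Int), Dom_coords m n_rows → Spec_coords m n_rows (coords m n_rows)
def Claim_changed_coords : Prop :=
  Dom_coords (pvDiffWitness_coords.1) (pvDiffWitness_coords.2) ∧
  D_coords (pvDiffWitness_coords.1) (pvDiffWitness_coords.2) ∧
  coords (pvDiffWitness_coords.1) (pvDiffWitness_coords.2) = pvDiffWitnessOut_coords.1 ∧
  coords_alt (pvDiffWitness_coords.1) (pvDiffWitness_coords.2) = pvDiffWitnessOut_coords.2 ∧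
  pvDiffWitnessOut_coords.1 ≠ pvDiffWitnessOut_coords.2
def Claim_exact_coords : Prop :=
  ∀ (m : Int) (n_rows : Int), Dom_coords m n_rows → D_coords m n_rows →
    coords m n_rows ≠ coords_alt m n_rows

-- ===== LEMMAS AND PROOFS =====

def rowOf (n i : Int) : Int :=
  if i % (2 * (n - 1)) ≤ n - 1 then i % (2 * (n - 1)) else 2 * (n - 1) - i % (2 * (n - 1))

def bucket (n : Int) (t : Nat) (k : Nat) : List Int :=
  ((List.range t).map (fun (i : Nat) => (i : Int))).filter (fun x => rowOf n x == (k : Int))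

def rowsAt (n : Int) (t : Nat) : List (List Int) :=
  (List.range n.toNat).map (bucket n t)

def stepAt (n : Int) (t : Nat) : Int :=
  if t = 0 then 1 else if ((t : Int) - 1) % (2 * (n - 1)) < n - 1 then 1 else -1

theorem rowOf_bounds (n i : Int) (h2 : 2 ≤ n) : 0 ≤ rowOf n i ∧ rowOf n i ≤ n - 1 := by
  have h1 := Int.emod_nonneg i (by omega : (2*(n-1):Int) ≠ 0)
  have h2' := Int.emod_lt_of_pos i (by omega : (0:Int) < 2*(n-1))
  unfold rowOf
  split_ifs <;> omega

theorem emod_succ (n : Int) (h2 : 2 ≤ n) (t : Nat) :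
    ((t : Int) + 1) % (2*(n-1)) =
      if (t : Int) % (2*(n-1)) + 1 = 2*(n-1) then 0 else (t : Int) % (2*(n-1)) + 1 := by
  have h1 := Int.emod_nonneg (t : Int) (by omega : (2*(n-1):Int) ≠ 0)
  have h2' := Int.emod_lt_of_pos (t : Int) (by omega : (0:Int) < 2*(n-1))
  rw [Int.add_emod, Int.emod_eq_of_lt (by omega) (by omega : (1:Int) < 2*(n-1))]
  split_ifs with h
  · rw [show (t:Int) % (2*(n-1)) + 1 = 2*(n-1) from h, Int.emod_self]
  · exact Int.emod_eq_of_lt (by omega) (by omega)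

theorem emod_pred (n : Int) (h2 : 2 ≤ n) (t : Nat) (ht : (t:Int) % (2*(n-1)) ≠ 0) :
    ((t : Int) - 1) % (2*(n-1)) = (t : Int) % (2*(n-1)) - 1 := by
  have h1 := Int.emod_nonneg (t : Int) (by omega : (2*(n-1):Int) ≠ 0)
  have h2' := Int.emod_lt_of_pos (t : Int) (by omega : (0:Int) < 2*(n-1))
  rw [Int.sub_emod, Int.emod_eq_of_lt (by omega) (by omega : (1:Int) < 2*(n-1))]
  exact Int.emod_eq_of_lt (by omega) (by omega)

theorem bucket_succ (n : Int) (t : Nat) (k : Nat) :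
    bucket n (t+1) k =
      bucket n t k ++ (if rowOf n t = (k : Int) then [(t : Int)] else []) := by
  unfold bucket
  rw [List.range_succ, List.map_append, List.filter_append]
  by_cases h : rowOf n (t:Int) = (k:Int) <;> simp [List.filter, h]

theorem rows_step (n : Int) (h2 : 2 ≤ n) (t : Nat) :
    (rowsAt n t).set (rowOf n t).toNat
        ((rowsAt n t).getD (rowOf n t).toNat [] ++ [(t:Int)]) = rowsAt n (t+1) := by
  have hb := rowOf_bounds n (t : Int) h2
  have hlt : (rowOf n t).toNat < n.toNat := by omega
  have hgetD : (rowsAt n t).getD (rowOf n t).toNat [] = bucket n t (rowOf n t).toNat := by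
    unfold rowsAt
    rw [List.getD_eq_getElem?_getD, List.getElem?_map, List.getElem?_range hlt]
    rfl
  rw [hgetD]
  apply List.ext_getElem
  · simp [rowsAt]
  · intro i hi1 hi2
    have hin : i < n.toNat := by simpa [rowsAt] using hi2
    rw [List.getElem_set]
    unfold rowsAt
    simp only [List.getElem_map, List.getElem_range]
    rw [bucket_succ n t i]
    by_cases hc : (rowOf n t).toNat = i
    · subst hc
      have hcast : (((rowOf n (t:Int)).toNat : Nat) : Int) = rowOf n (t:Int) := by omega
      rw [if_pos rfl, if_pos (show rowOf n (t:Int) = (((rowOf n (t:Int)).toNat : Nat) : Int) from hcast.symm)]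
    · have hne : ¬ rowOf n (t:Int) = (i : Int) := by omega
      rw [if_neg hc, if_neg hne, List.append_nil]

theorem bstep (n : Int) (h2 : 2 ≤ n) (t : Nat) :
    (fun (st : List (List Int) × Int × Int) (i : Int) =>
        let rows := st.1
        let cur := st.2.1
        let step := st.2.2
        let rows' := rows.set cur.toNat (rows.getD cur.toNat [] ++ [i])
        let step' := if cur = 0 then 1 else if cur = n - 1 then -1 else step
        (rows', cur + step', step'))
      (rowsAt n t, rowOf n t, stepAt n t) (t : Int)
    = (rowsAt n (t+1), rowOf n (t+1), stepAt n (t+1)) := by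
  have hb := rowOf_bounds n (t : Int) h2
  have h1 := Int.emod_nonneg (t : Int) (by omega : (2*(n-1):Int) ≠ 0)
  have h2' := Int.emod_lt_of_pos (t : Int) (by omega : (0:Int) < 2*(n-1))
  have hsucc := emod_succ n h2 t
  have hc1 : ((((t:Nat)+1 : Nat)) : Int) = (t:Int) + 1 := by push_cast; ring
  simp only
  refine Prod.ext ?_ (Prod.ext ?_ ?_)
  · -- rows: the step' choice does not affect the rows component
    exact rows_step n h2 t
  · -- cur
    show rowOf n t + (if rowOf n t = 0 then 1 else if rowOf n t = n - 1 then -1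
        else stepAt n t) = rowOf n (((t+1 : Nat) : Int))
    unfold rowOf stepAt
    rw [hc1]
    simp only [hsucc]
    by_cases hz : (t:Int) % (2*(n-1)) = 0
    · simp only [hz] at *
      split_ifs <;> omega
    · have hp := emod_pred n h2 t hz
      by_cases ht0 : t = 0
      · subst ht0; simp at hz
      · simp only [if_neg ht0, hp]
        split_ifs <;> omega
  · -- step
    show (if rowOf n t = 0 then 1 else if rowOf n t = n - 1 then -1 else stepAt n t)
        = stepAt n (t+1)
    unfold rowOf stepAt
    simp only [if_neg (Nat.succ_ne_zero t), hc1, add_sub_cancel_right]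
    by_cases hz : (t:Int) % (2*(n-1)) = 0
    · simp only [hz]; split_ifs <;> omega
    · have hp := emod_pred n h2 t hz
      by_cases ht0 : t = 0
      · subst ht0; simp at hz
      · simp only [if_neg ht0, hp]
        split_ifs <;> omega

def rowList (m n k : Int) : List Int :=
  (PySem.List.pyRange 0 m 1).filter (fun x => rowOf n x == k)

theorem rowsAt_zero (n : Int) : rowsAt n 0 = List.replicate n.toNat [] := by
  have h : ∀ k ∈ List.range n.toNat, bucket n 0 k = ([] : List Int) := by
    intro k _; simp [bucket]
  unfold rowsAt
  rw [List.map_congr_left h, List.map_const', List.length_range]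

theorem rowOf_zero (n : Int) (h2 : 2 ≤ n) : rowOf n 0 = 0 := by
  unfold rowOf
  rw [Int.zero_emod]
  rw [if_pos (by omega)]

theorem bfold (n : Int) (h2 : 2 ≤ n) (t : Nat) :
    ((List.range t).map (fun (i : Nat) => (i : Int))).foldl
      (fun (st : List (List Int) × Int × Int) i =>
        let rows := st.1
        let cur := st.2.1
        let step := st.2.2
        let rows' := rows.set cur.toNat (rows.getD cur.toNat [] ++ [i])
        let step' := if cur = 0 then 1 else if cur = n - 1 then -1 else step
        (rows', cur + step', step'))
      (List.replicate n.toNat [], 0, 1)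
    = (rowsAt n t, rowOf n t, stepAt n t) := by
  induction t with
  | zero => simp [rowsAt_zero, rowOf_zero n h2, stepAt]
  | succ t ih =>
    rw [List.range_succ, List.map_append, List.foldl_append, ih]
    simpa using bstep n h2 t

theorem coords_alt_eq (m n : Int) (h2 : 2 ≤ n) (hm : 0 ≤ m) :
    coords_alt m n = (PySem.List.pyRange 0 n 1).flatMap (fun k => rowList m n k) := by
  unfold coords_alt
  rw [if_neg (by omega), if_neg (by omega)]
  have hpm : PySem.List.pyRange 0 m 1 = (List.range m.toNat).map (fun (i : Nat) => (i : Int)) := by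
    have := PySem.List.pyRange_zero_natCast m.toNat
    rwa [show ((m.toNat : Nat) : Int) = m by omega] at this
  have hpn : PySem.List.pyRange 0 n 1 = (List.range n.toNat).map (fun (i : Nat) => (i : Int)) := by
    have := PySem.List.pyRange_zero_natCast n.toNat
    rwa [show ((n.toNat : Nat) : Int) = n by omega] at this
  rw [hpm, bfold n h2 m.toNat]
  rw [hpn, List.flatMap_map]
  show (rowsAt n m.toNat).flatten = _
  unfold rowsAt
  rw [← List.flatMap_def]
  apply List.flatMap_congr
  intro a _
  unfold bucket rowList
  rw [hpm]

def periodRow (n k : Int) : List Int :=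
  if k = 0 then [0] else if k = n - 1 then [n - 1] else [k, 2 * (n - 1) - k]

-- filter of a range with a unique solution
theorem filter_range_unique (a b s : Int) (p : Int → Bool)
    (hs : a ≤ s ∧ s < b) (h : ∀ x, a ≤ x → x < b → (p x = true ↔ x = s)) :
    (PySem.List.pyRange a b 1).filter p = [s] := by
  have hcong : ∀ x ∈ PySem.List.pyRange a b 1, p x = decide (x = s) := by
    intro x hx
    rw [PySem.List.mem_pyRange_one] at hx
    by_cases hxs : x = s
    · subst hxs
      simp [(h x hx.1 hx.2).2 rfl]
    · simp only [decide_eq_false hxs]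
      rw [← Bool.not_eq_true]
      intro hc
      exact hxs ((h x hx.1 hx.2).1 hc)
  rw [List.filter_congr hcong, List.filter_eq,
    (PySem.List.nodup_pyRange_one a b).count,
    if_pos (PySem.List.mem_pyRange_one.2 hs)]
  rfl

-- one full period filters to periodRow
theorem filter_period (n k : Int) (h2 : 2 ≤ n) (hk0 : 0 ≤ k) (hkN : k ≤ n - 1) :
    (PySem.List.pyRange 0 (2*(n-1)) 1).filter (fun x => rowOf n x == k) = periodRow n k := by
  have hrow : ∀ x : Int, 0 ≤ x → x < 2*(n-1) →
      rowOf n x = if x ≤ n - 1 then x else 2*(n-1) - x := by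
    intro x hx1 hx2
    unfold rowOf
    rw [Int.emod_eq_of_lt hx1 hx2]
  unfold periodRow
  split_ifs with h0 hN
  · subst h0
    apply filter_range_unique 0 (2*(n-1)) 0 _ (by omega)
    intro x hx1 hx2
    rw [beq_iff_eq, hrow x hx1 hx2]
    split_ifs <;> omega
  · subst hN
    apply filter_range_unique 0 (2*(n-1)) (n-1) _ (by omega)
    intro x hx1 hx2
    rw [beq_iff_eq, hrow x hx1 hx2]
    split_ifs <;> omega
  · rw [PySem.List.pyRange_one_append 0 n (2*(n-1)) (by omega) (by omega), List.filter_append]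
    rw [filter_range_unique 0 n k _ (by omega) (by
      intro x hx1 hx2
      rw [beq_iff_eq, hrow x hx1 (by omega)]
      split_ifs <;> omega)]
    rw [filter_range_unique n (2*(n-1)) (2*(n-1)-k) _ (by omega) (by
      intro x hx1 hx2
      rw [beq_iff_eq, hrow x (by omega) hx2]
      split_ifs <;> omega)]
    rfl

-- a shifted period filters to the shifted periodRow
theorem filter_period_shift (n k j : Int) (h2 : 2 ≤ n) (hk0 : 0 ≤ k) (hkN : k ≤ n - 1) :
    (PySem.List.pyRange (2*(n-1)*j) (2*(n-1)*(j+1)) 1).filter (fun x => rowOf n x == k)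
      = (periodRow n k).map (fun e => 2*(n-1)*j + e) := by
  have hshift : PySem.List.pyRange (2*(n-1)*j) (2*(n-1)*(j+1)) 1
      = (PySem.List.pyRange 0 (2*(n-1)) 1).map (fun e => 2*(n-1)*j + e) := by
    rw [PySem.List.pyRange_one (2*(n-1)*j), PySem.List.pyRange_one 0, List.map_map]
    rw [show 2*(n-1)*(j+1) - 2*(n-1)*j = 2*(n-1) - 0 by ring]
    apply List.map_congr_left
    intro a _
    simp
  rw [hshift, List.filter_map]
  have hcong : ∀ x ∈ PySem.List.pyRange 0 (2*(n-1)) 1,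
      ((fun x => rowOf n x == k) ∘ (fun e => 2*(n-1)*j + e)) x = (fun x => rowOf n x == k) x := by
    intro x hx
    rw [PySem.List.mem_pyRange_one] at hx
    have : rowOf n (2*(n-1)*j + x) = rowOf n x := by
      unfold rowOf
      rw [show 2*(n-1)*j + x = x + 2*(n-1)*j by ring, Int.add_mul_emod_self_left]
    simp [this]
  rw [List.filter_congr hcong, filter_period n k h2 hk0 hkN]

theorem mem_periodRow_bounds (n k e : Int) (h2 : 2 ≤ n) (hk0 : 0 ≤ k) (hkN : k ≤ n - 1)
    (he : e ∈ periodRow n k) : 0 ≤ e ∧ e < 2*(n-1) := by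
  unfold periodRow at he
  split_ifs at he <;> simp at he <;> omega

theorem filter_front (n k : Int) (h2 : 2 ≤ n) (hk0 : 0 ≤ k) (hkN : k ≤ n - 1) (q : Nat) :
    (PySem.List.pyRange 0 (2*(n-1)*(q:Int)) 1).filter (fun x => rowOf n x == k)
      = (PySem.List.pyRange 0 (q:Int) 1).flatMap
          (fun jj => (periodRow n k).map (fun e => 2*(n-1)*jj + e)) := by
  induction q with
  | zero =>
    simp [PySem.List.pyRange_one_eq_nil (by omega : (0:Int) ≤ 0)]
  | succ q ih =>
    have hsplit : PySem.List.pyRange 0 (2*(n-1)*((q:Int)+1)) 1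
        = PySem.List.pyRange 0 (2*(n-1)*(q:Int)) 1 ++
          PySem.List.pyRange (2*(n-1)*(q:Int)) (2*(n-1)*((q:Int)+1)) 1 :=
      PySem.List.pyRange_one_append _ _ _
        (mul_nonneg (by omega) (by positivity)) (by nlinarith [Int.natCast_nonneg q])
    rw [show ((q+1 : Nat) : Int) = (q:Int)+1 by push_cast; ring, hsplit, List.filter_append,
      ih, filter_period_shift n k (q:Int) h2 hk0 hkN,
      PySem.List.pyRange_one_succ_right (by positivity : (0:Int) ≤ (q:Int)),
      List.flatMap_append]
    simp

theorem row_assembly (m n k : Int) (h2 : 2 ≤ n) (hk0 : 0 ≤ k) (hkN : k ≤ n - 1) (hm : 0 < m) :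
    (PySem.List.pyRange 0 (PySem.Int.floordiv m (2*(n-1)) + 1) 1).flatMap
        (fun jj => ((periodRow n k).map (fun e => 2*(n-1)*jj + e)).filter (fun x => x < m))
      = rowList m n k := by
  have hc : (0:Int) < 2*(n-1) := by omega
  set c : Int := 2*(n-1) with hcdef
  have hfd : PySem.Int.floordiv m c = m / c := PySem.Int.floordiv_eq_ediv_of_pos hc
  have hq0' : 0 ≤ m / c := Int.ediv_nonneg (by omega) (by omega)
  have hcq' : c * (m / c) ≤ m := by
    have := Int.emod_nonneg m (by omega : c ≠ 0)
    have := Int.mul_ediv_add_emod m c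
    omega
  have hmq' : m < c * (m / c + 1) := by
    have ha := Int.emod_lt_of_pos m hc
    have hb := Int.mul_ediv_add_emod m c
    have hcc : c * (m / c + 1) = c * (m / c) + c := by ring
    omega
  rw [hfd]
  obtain ⟨q, hq⟩ : ∃ q, m / c = q := ⟨m / c, rfl⟩
  rw [hq] at hq0' hcq' hmq' ⊢
  have hq0 := hq0'; have hcq := hcq'; have hmq := hmq'
  rw [PySem.List.pyRange_one_succ_right hq0, List.flatMap_append]
  -- full periods: the < m filter keeps everything
  have hfull : (PySem.List.pyRange 0 q 1).flatMap
      (fun jj => ((periodRow n k).map (fun e => c*jj + e)).filter (fun x => x < m))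
      = (PySem.List.pyRange 0 q 1).flatMap
          (fun jj => (periodRow n k).map (fun e => c*jj + e)) := by
    apply List.flatMap_congr
    intro jj hjj
    rw [PySem.List.mem_pyRange_one] at hjj
    rw [List.filter_eq_self]
    intro a ha
    rw [List.mem_map] at ha
    obtain ⟨e, he, rfl⟩ := ha
    have hb := mem_periodRow_bounds n k e h2 hk0 hkN he
    simp only [decide_eq_true_eq]
    nlinarith [hjj.1, hjj.2, hb.1, hb.2]
  rw [hfull]
  -- last partial period
  have hlast : ((periodRow n k).map (fun e => c*q + e)).filter (fun x => x < m)
      = (PySem.List.pyRange (c*q) m 1).filter (fun x => rowOf n x == k) := by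
    have hper := filter_period_shift n k q h2 hk0 hkN
    rw [PySem.List.pyRange_one_append (c*q) m (c*(q+1)) hcq (by omega),
      List.filter_append] at hper
    have e1 : ((PySem.List.pyRange (c*q) m 1).filter (fun x => rowOf n x == k)).filter
        (fun x => x < m) = (PySem.List.pyRange (c*q) m 1).filter (fun x => rowOf n x == k) := by
      rw [List.filter_eq_self]
      intro a ha
      have := (List.mem_filter.1 ha).1
      rw [PySem.List.mem_pyRange_one] at this
      simp [this.2]
    have e2 : ((PySem.List.pyRange m (c*(q+1)) 1).filter (fun x => rowOf n x == k)).filter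
        (fun x => x < m) = [] := by
      rw [List.filter_eq_nil_iff]
      intro a ha
      have := (List.mem_filter.1 ha).1
      rw [PySem.List.mem_pyRange_one] at this
      simp; omega
    rw [← hper, List.filter_append, e1, e2, List.append_nil]
  have hfront := filter_front n k h2 hk0 hkN q.toNat
  rw [show ((q.toNat : Nat) : Int) = q by omega] at hfront
  have hsingle : List.flatMap
      (fun jj => ((periodRow n k).map (fun e => c*jj + e)).filter (fun x => x < m)) [q]
      = ((periodRow n k).map (fun e => c*q + e)).filter (fun x => x < m) := by simp
  rw [hsingle, hlast, ← hfront]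
  unfold rowList
  rw [PySem.List.pyRange_one_append 0 (c*q) m (mul_nonneg (by omega) hq0) hcq,
    List.filter_append]

theorem foldl_one_if (l : List Int) (g : Int → Int) (m : Int) (acc : List Int) :
    l.foldl (fun acc jj => if g jj < m then acc ++ [g jj] else acc) acc
      = acc ++ l.flatMap (fun jj => ([g jj]).filter (fun x => x < m)) := by
  induction l generalizing acc with
  | nil => simp
  | cons hd tl ih =>
    rw [List.foldl_cons, ih, List.flatMap_cons]
    by_cases h : g hd < m <;> simp [List.filter, h]

theorem foldl_two_if (l : List Int) (f g : Int → Int) (m : Int) (acc : List Int) :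
    l.foldl (fun acc jj =>
        if g jj < m then (if f jj < m then acc ++ [f jj] else acc) ++ [g jj]
        else (if f jj < m then acc ++ [f jj] else acc)) acc
      = acc ++ l.flatMap (fun jj => ([f jj, g jj]).filter (fun x => x < m)) := by
  induction l generalizing acc with
  | nil => simp
  | cons hd tl ih =>
    rw [List.foldl_cons, ih, List.flatMap_cons]
    by_cases h1 : f hd < m <;> by_cases h2 : g hd < m <;>
      simp [List.filter, h1, h2]

theorem coords_eq (m n : Int) (h2 : 2 ≤ n) (hm : 0 < m) :
    coords m n = (PySem.List.pyRange 0 n 1).flatMap (fun k => rowList m n k) := by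
  have hc : (0:Int) < 2*(n-1) := by omega
  unfold coords
  rw [if_neg (by omega : ¬ (n - 1 = 0))]
  simp only
  rw [foldl_one_if, foldl_one_if]
  rw [PySem.List.foldl_congr_mem _ _
    (fun acc kk => acc ++ (PySem.List.pyRange 0 (PySem.Int.floordiv m (2*(n-1)) + 1) 1).flatMap
      (fun jj => ([2*(n-1)*jj + kk, 2*(n-1)*(jj+1) - kk]).filter (fun x => x < m))) _
    (by intro acc kk _; exact foldl_two_if _ _ _ m acc)]
  rw [PySem.List.foldl_append_eq_flatMap]
  simp only [List.nil_append]
  -- rewrite the three pieces into row_assembly form and assemble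
  have hR : ∀ k : Int, 0 ≤ k → k ≤ n - 1 →
      (PySem.List.pyRange 0 (PySem.Int.floordiv m (2*(n-1)) + 1) 1).flatMap
        (fun jj => ((periodRow n k).map (fun e => 2*(n-1)*jj + e)).filter (fun x => x < m))
      = rowList m n k := fun k hk0 hkN => row_assembly m n k h2 hk0 hkN hm
  have h0 : (PySem.List.pyRange 0 (PySem.Int.floordiv m (2*(n-1)) + 1) 1).flatMap
      (fun jj => ([2*(n-1)*jj] : List Int).filter (fun x => x < m)) = rowList m n 0 := by
    rw [← hR 0 le_rfl (by omega)]
    apply List.flatMap_congr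
    intro jj _
    simp [periodRow]
  have hn0 : ¬ (n - 1 : Int) = 0 := by omega
  have hN : (PySem.List.pyRange 0 (PySem.Int.floordiv m (2*(n-1)) + 1) 1).flatMap
      (fun jj => ([2*(n-1)*jj + (n-1)] : List Int).filter (fun x => x < m))
      = rowList m n (n-1) := by
    rw [← hR (n-1) (by omega) le_rfl]
    apply List.flatMap_congr
    intro jj _
    simp [periodRow, hn0]
  have hmid : ∀ kk ∈ PySem.List.pyRange 1 (n-1) 1,
      (PySem.List.pyRange 0 (PySem.Int.floordiv m (2*(n-1)) + 1) 1).flatMap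
        (fun jj => ([2*(n-1)*jj + kk, 2*(n-1)*(jj+1) - kk] : List Int).filter (fun x => x < m))
      = rowList m n kk := by
    intro kk hkk
    rw [PySem.List.mem_pyRange_one] at hkk
    rw [← hR kk (by omega) (by omega)]
    apply List.flatMap_congr
    intro jj _
    have hpr : periodRow n kk = [kk, 2*(n-1) - kk] := by
      unfold periodRow
      rw [if_neg (by omega), if_neg (by omega)]
    rw [hpr]
    have : (2*(n-1)*(jj+1) - kk : Int) = 2*(n-1)*jj + (2*(n-1) - kk) := by ring
    rw [this]
    simp
  rw [h0, hN, List.flatMap_congr hmid]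
  have hs1 : PySem.List.pyRange 0 1 1 = [(0:Int)] := by
    have := PySem.List.pyRange_one_singleton (0:Int)
    simpa using this
  have hs2 : PySem.List.pyRange (n-1) n 1 = [n-1] := by
    have := PySem.List.pyRange_one_singleton (n-1:Int)
    rwa [show (n-1+1 : Int) = n by ring] at this
  rw [PySem.List.pyRange_one_append 0 1 n (by omega) (by omega),
    PySem.List.pyRange_one_append 1 (n-1) n (by omega) (by omega),
    List.flatMap_append, List.flatMap_append, hs1, hs2]
  simp

theorem coords_alt_empty_of_nonpos (m n : Int) (hm : m ≤ 0) :
    coords_alt m n = [] := by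
  unfold coords_alt
  split_ifs with h1 h2
  · rfl
  · simp [PySem.List.pyRange_one_eq_nil hm]
  · simp [PySem.List.pyRange_one_eq_nil hm]

theorem coords_empty_of_nonpos (m n : Int) (h2 : 2 ≤ n) (hm : m ≤ 0) : coords m n = [] := by
  unfold coords
  rw [if_neg (by omega : ¬ (n - 1 = 0))]
  simp only
  rw [foldl_one_if, foldl_one_if]
  rw [PySem.List.foldl_congr_mem _ _
    (fun acc kk => acc ++ (PySem.List.pyRange 0 (PySem.Int.floordiv m (2*(n-1)) + 1) 1).flatMap
      (fun jj => ([2*(n-1)*jj + kk, 2*(n-1)*(jj+1) - kk]).filter (fun x => x < m))) _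
    (by intro acc kk _; exact foldl_two_if _ _ _ m acc)]
  rw [PySem.List.foldl_append_eq_flatMap]
  have e1 : (PySem.List.pyRange 0 (PySem.Int.floordiv m (2*(n-1)) + 1) 1).flatMap
      (fun jj => ([2*(n-1)*jj] : List Int).filter (fun x => x < m)) = [] := by
    rw [List.flatMap_eq_nil_iff]
    intro jj hjj
    rw [PySem.List.mem_pyRange_one] at hjj
    rw [List.filter_eq_nil_iff]
    intro a ha
    simp only [List.mem_singleton] at ha
    subst ha
    simp only [decide_eq_true_eq, not_lt]
    nlinarith [hjj.1]
  have e3 : (PySem.List.pyRange 0 (PySem.Int.floordiv m (2*(n-1)) + 1) 1).flatMap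
      (fun jj => ([2*(n-1)*jj + (n-1)] : List Int).filter (fun x => x < m)) = [] := by
    rw [List.flatMap_eq_nil_iff]
    intro jj hjj
    rw [PySem.List.mem_pyRange_one] at hjj
    rw [List.filter_eq_nil_iff]
    intro a ha
    simp only [List.mem_singleton] at ha
    subst ha
    simp only [decide_eq_true_eq, not_lt]
    nlinarith [hjj.1]
  have e2 : (PySem.List.pyRange 1 (n-1) 1).flatMap
      (fun kk => (PySem.List.pyRange 0 (PySem.Int.floordiv m (2*(n-1)) + 1) 1).flatMap
        (fun jj => ([2*(n-1)*jj + kk, 2*(n-1)*(jj+1) - kk] : List Int).filter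
          (fun x => x < m))) = [] := by
    rw [List.flatMap_eq_nil_iff]
    intro kk hkk
    rw [PySem.List.mem_pyRange_one] at hkk
    rw [List.flatMap_eq_nil_iff]
    intro jj hjj
    rw [PySem.List.mem_pyRange_one] at hjj
    rw [List.filter_eq_nil_iff]
    intro a ha
    simp only [List.mem_cons, List.mem_singleton, List.not_mem_nil, or_false] at ha
    rcases ha with rfl | rfl <;> simp only [decide_eq_true_eq, not_lt] <;>
      nlinarith [hjj.1, hkk.1, hkk.2]
  rw [e1, e3, e2]
  simp

theorem coords_empty_of_nrows_nonpos (m n : Int)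
    (hn : n ≤ 0)
    (hD : ¬ (m ≤ 0 ∧ 2*(n-1) * PySem.Int.floordiv m (2*(n-1)) + (n-1) < m)) :
    coords m n = [] := by
  have hincr : (2*(n-1) : Int) ≤ -2 := by omega
  unfold coords
  rw [if_neg (by omega : ¬ (n - 1 = 0))]
  simp only
  rw [foldl_one_if, foldl_one_if]
  rw [PySem.List.pyRange_one_eq_nil (by omega : (n-1 : Int) ≤ 1)]
  simp only [List.foldl_nil]
  have hq : ∀ jj : Int, 0 ≤ jj → jj ≤ PySem.Int.floordiv m (2*(n-1)) →
      ¬ (2*(n-1)*jj + (n-1) < m) ∧ ¬ (2*(n-1)*jj < m) := by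
    intro jj hjj0 hjjq
    rcases not_and_or.1 hD with hm | hlast
    · -- m > 0 : the range is in fact empty, contradiction with jj in it
      rw [not_le] at hm
      exfalso
      have : PySem.Int.floordiv m (2*(n-1)) < 0 := by
        have hneg := PySem.Int.floordiv_neg_neg m (2*(n-1))
        rw [← hneg]
        exact (PySem.Int.floordiv_lt_iff_lt_mul (by omega)).2 (by rw [zero_mul]; omega)
      omega
    · rw [not_lt] at hlast
      have hmono : 2*(n-1) * PySem.Int.floordiv m (2*(n-1)) ≤ 2*(n-1)*jj := by
        nlinarith
      constructor <;> omega
  have e1 : (PySem.List.pyRange 0 (PySem.Int.floordiv m (2*(n-1)) + 1) 1).flatMap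
      (fun jj => ([2*(n-1)*jj] : List Int).filter (fun x => x < m)) = [] := by
    rw [List.flatMap_eq_nil_iff]
    intro jj hjj
    rw [PySem.List.mem_pyRange_one] at hjj
    rw [List.filter_eq_nil_iff]
    intro a ha
    simp only [List.mem_singleton] at ha
    subst ha
    simp only [decide_eq_true_eq]
    exact (hq jj hjj.1 (by omega)).2
  have e3 : (PySem.List.pyRange 0 (PySem.Int.floordiv m (2*(n-1)) + 1) 1).flatMap
      (fun jj => ([2*(n-1)*jj + (n-1)] : List Int).filter (fun x => x < m)) = [] := by
    rw [List.flatMap_eq_nil_iff]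
    intro jj hjj
    rw [PySem.List.mem_pyRange_one] at hjj
    rw [List.filter_eq_nil_iff]
    intro a ha
    simp only [List.mem_singleton] at ha
    subst ha
    simp only [decide_eq_true_eq]
    exact (hq jj hjj.1 (by omega)).1
  rw [e1, e3]
  simp

theorem coords_ne_nil_of_D' (m n : Int) (hn : n ≤ 0) (hm : m ≤ 0)
    (hlt : 2*(n-1) * PySem.Int.floordiv m (2*(n-1)) + (n-1) < m) : coords m n ≠ [] := by
  have hincr : (2*(n-1) : Int) ≤ -2 := by omega
  have hq0 : 0 ≤ PySem.Int.floordiv m (2*(n-1)) := by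
    have hneg := PySem.Int.floordiv_neg_neg m (2*(n-1))
    rw [← hneg]
    exact PySem.Int.le_floordiv_iff_mul_le (by omega) |>.2 (by rw [zero_mul]; omega)
  unfold coords
  rw [if_neg (by omega : ¬ (n - 1 = 0))]
  simp only
  rw [foldl_one_if, foldl_one_if]
  simp only [List.nil_append]
  intro hnil
  have hmem : (2*(n-1) * PySem.Int.floordiv m (2*(n-1)) + (n-1)) ∈
      (PySem.List.pyRange 0 (PySem.Int.floordiv m (2*(n-1)) + 1) 1).flatMap
        (fun jj => ([2*(n-1)*jj + (n-1)] : List Int).filter (fun x => x < m)) := by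
    rw [List.mem_flatMap]
    refine ⟨PySem.Int.floordiv m (2*(n-1)),
      PySem.List.mem_pyRange_one.2 ⟨hq0, by omega⟩, ?_⟩
    simp [hlt]
  have h3 := (List.append_eq_nil_iff.1 hnil).2
  rw [h3] at hmem
  exact List.not_mem_nil hmem

-- ===== VERDICT (by name: the statement is the Claim_ definition above) =====
theorem coords_spec : Claim_unchanged_coords := by
  intro m n _ hD
  rcases lt_trichotomy n 1 with h | h | h
  · -- n ≤ 0
    have hn : n ≤ 0 := by omega
    rw [coords_empty_of_nrows_nonpos m n hn (fun hc => hD ⟨hn, hc.1, hc.2⟩)]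
    unfold coords_alt
    rw [if_pos hn]
  · -- n = 1
    subst h; simp [coords, coords_alt]
  · -- n ≥ 2
    rcases le_or_gt m 0 with hm | hm
    · rw [coords_empty_of_nonpos m n (by omega) hm, coords_alt_empty_of_nonpos m n hm]
    · rw [coords_eq m n (by omega) hm, coords_alt_eq m n (by omega) (by omega)]

theorem coords_changed : Claim_changed_coords := by
  unfold Claim_changed_coords; decide

theorem coords_tight : Claim_exact_coords := by
  intro m n _ hD
  have h1 := coords_ne_nil_of_D' m n hD.1 hD.2.1 hD.2.2
  have h2 : coords_alt m n = [] := by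
    unfold coords_alt
    rw [if_pos hD.1]
  rw [h2]
  exact h1
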